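-- pv_equiv track=rewrite | github.com/ccubc/DS_self_learning | leetcode_algorithm/hacker_rank_medium_triple_sum.py | triplets
-- ===== SOURCE A (Python) =====
-- import bisect
--
-- def triplets(a, b, c):
--     a, b, c = list(sorted(set(a))), list(sorted(set(b))), list(sorted(set(c)))
--     res = 0
--     for i in b:
--         a_i = bisect.bisect_right(a, i)
--         c_i = bisect.bisect_right(c, i)
--         res += (a_i*c_i)
--     return res
-- ===== SOURCE B (Python) =====
-- def triplets(a, b, c):
--     # Same answer as the bisect version, but one linear two-pointer sweep
--     # over the sorted distinct b instead of a binary search per element.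
--     a, b, c = sorted(set(a)), sorted(set(b)), sorted(set(c))
--     pa = pc = 0
--     res = 0
--     for v in b:
--         while pa < len(a) and a[pa] <= v:
--             pa += 1
--         while pc < len(c) and c[pc] <= v:
--             pc += 1
--         res += pa * pc
--     return res
-- ===== Notes on version B (the rewrite author's own statement) =====
-- stated objective: alternative
-- what changed: Replaces the per-element bisect_right binary searches with a single merge-style two-pointer sweep: the counting pointers into sorted(set(a)) and sorted(set(c)) only advance monotonically across the ascending b values.
import Mathlib
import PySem

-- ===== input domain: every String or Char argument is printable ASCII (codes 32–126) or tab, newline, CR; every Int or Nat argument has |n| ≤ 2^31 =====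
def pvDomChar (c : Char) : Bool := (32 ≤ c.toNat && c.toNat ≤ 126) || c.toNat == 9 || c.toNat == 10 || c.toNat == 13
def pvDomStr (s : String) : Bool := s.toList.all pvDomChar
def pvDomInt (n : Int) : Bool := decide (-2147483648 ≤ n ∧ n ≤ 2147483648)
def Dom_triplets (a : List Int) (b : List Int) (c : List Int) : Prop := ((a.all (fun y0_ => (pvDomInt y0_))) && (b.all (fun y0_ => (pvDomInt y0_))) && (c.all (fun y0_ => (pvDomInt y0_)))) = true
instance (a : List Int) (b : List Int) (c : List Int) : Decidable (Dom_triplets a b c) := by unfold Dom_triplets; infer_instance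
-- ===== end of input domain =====

-- B replaces A's per-element bisect_right binary searches by one monotone two-pointer
-- sweep over the ascending distinct b values; same result, different traversal.


-- ===== PORT A =====
-- sorted(set(xs)) — shared preprocessing of both Pythons
def dss (xs : List Int) : List Int :=
  PySem.List.sorted (PySem.Set.ofList xs) (fun x => x)

def triplets (a : List Int) (b : List Int) (c : List Int) : Int :=
  let a' := dss a
  let b' := dss b
  let c' := dss c
  b'.foldl (fun res i =>
    let a_i : Int := (PySem.List.bisectRight a' i : Int)
    let c_i : Int := (PySem.List.bisectRight c' i : Int)
    res + a_i * c_i) 0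

-- ===== PORT B =====
-- 'while p < len(l) and l[p] <= v: p += 1'
def adv (l : List Int) (v : Int) (p : Nat) : Nat :=
  if h : p < l.length then
    if l[p] ≤ v then adv l v (p + 1) else p
  else p
termination_by l.length - p

-- 'for v in b: … res += pa * pc'
def tripLoop (a' : List Int) (c' : List Int) : List Int → Nat → Nat → Int → Int
  | [], _, _, res => res
  | v :: bs, pa, pc, res =>
    let pa' := adv a' v pa
    let pc' := adv c' v pc
    tripLoop a' c' bs pa' pc' (res + (pa' : Int) * (pc' : Int))

def triplets_alt (a : List Int) (b : List Int) (c : List Int) : Int :=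
  tripLoop (dss a) (dss c) (dss b) 0 0 0

-- ===== PRECONDITION & SPEC =====
def Spec_triplets (a : List Int) (b : List Int) (c : List Int) (out : Int) : Prop := out = triplets_alt a b c
instance (a : List Int) (b : List Int) (c : List Int) (out : Int) : Decidable (Spec_triplets a b c out) := by unfold Spec_triplets; infer_instance

-- ===== CLAIM (what is proved, stated in full; the proofs are below) =====
def Claim_equal_triplets : Prop := ∀ (a : List Int) (b : List Int) (c : List Int), Dom_triplets a b c → Spec_triplets a b c (triplets a b c)

-- ===== LEMMAS AND PROOFS =====

-- the common yardstick: number of leading elements ≤ v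
def tw (l : List Int) (v : Int) : Nat := (l.takeWhile (fun x => decide (x ≤ v))).length

theorem tw_le_length (l : List Int) (v : Int) : tw l v ≤ l.length := by
  induction l with
  | nil => simp [tw]
  | cons x t ih =>
      simp only [tw, List.takeWhile_cons] at *
      by_cases h : x ≤ v <;> simp [h] <;> omega

theorem tw_get (l : List Int) (v : Int) (i : Nat) (hi : i < l.length)
    (h : i < tw l v) : l[i] ≤ v := by
  induction l generalizing i with
  | nil => simp at hi
  | cons x t ih =>
      simp only [tw, List.takeWhile_cons] at h
      by_cases hx : x ≤ v
      · cases i with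
        | zero => simpa using hx
        | succ j =>
            simp only [hx, decide_true, if_true, List.length_cons] at h
            exact ih j (by simpa using hi) (by simpa [tw] using Nat.lt_of_succ_lt_succ h)
      · simp [hx] at h
  
theorem tw_stop (l : List Int) (v : Int) (h : tw l v < l.length) :
    ¬ l[tw l v]'h ≤ v := by
  induction l with
  | nil => simp at h
  | cons x t ih =>
      by_cases hx : x ≤ v
      · have htw : tw (x :: t) v = tw t v + 1 := by simp [tw, hx]
        have ht : tw t v < t.length := by simp only [htw, List.length_cons] at h; omega
        have e : (x :: t)[tw (x :: t) v]'h = t[tw t v]'ht := by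
          rw [getElem_congr rfl htw (htw ▸ h)]
          exact List.getElem_cons_succ ..
        rw [e]; exact ih ht
      · have htw : tw (x :: t) v = 0 := by simp [tw, hx]
        have e : (x :: t)[tw (x :: t) v]'h = x := by
          rw [getElem_congr rfl htw (htw ▸ h)]
          exact List.getElem_cons_zero ..
        rw [e]; exact hx

theorem tw_mono (l : List Int) (u v : Int) (huv : u ≤ v) : tw l u ≤ tw l v := by
  induction l with
  | nil => simp [tw]
  | cons x t ih =>
      by_cases hx : x ≤ u
      · simp [tw, hx, le_trans hx huv] at *; omega
      · simp [tw, List.takeWhile_cons, hx]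

theorem adv_eq (l : List Int) (v : Int) (p : Nat) (hp : p ≤ tw l v) :
    adv l v p = tw l v := by
  revert hp
  fun_induction adv l v p with
  | case1 p h hle ih =>
      intro hp
      apply ih
      rcases Nat.lt_or_ge p (tw l v) with hlt | hge
      · omega
      · have heq : p = tw l v := le_antisymm hp hge
        subst heq
        exact absurd hle (tw_stop l v h)
  | case2 p h hle =>
      intro hp
      rcases Nat.lt_or_ge p (tw l v) with hlt | hge
      · exact absurd (tw_get l v p h hlt) hle
      · omega
  | case3 p h =>
      intro hp
      have := tw_le_length l v
      omega

theorem br_eq_tw (l : List Int) (x : Int) (hl : l.Pairwise (· ≤ ·)) :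
    PySem.List.bisectRight l x = tw l x := by
  obtain ⟨hle, hbelow, habove⟩ := PySem.List.bisectRight_spec l x hl
  rcases Nat.lt_trichotomy (PySem.List.bisectRight l x) (tw l x) with h | h | h
  · have hk : PySem.List.bisectRight l x < l.length := lt_of_lt_of_le h (tw_le_length l x)
    have h1 := tw_get l x _ hk h
    have h2 := habove _ hk (le_refl _)
    omega
  · exact h
  · have ht : tw l x < l.length := lt_of_lt_of_le h hle
    have h1 := hbelow _ ht h
    have h2 := tw_stop l x ht
    exact absurd h1 h2

theorem loop_eq (a' c' : List Int) (bs : List Int) (pa pc : Nat) (res : Int)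
    (hbs : bs.Pairwise (· ≤ ·))
    (hpa : ∀ v ∈ bs, pa ≤ tw a' v) (hpc : ∀ v ∈ bs, pc ≤ tw c' v) :
    tripLoop a' c' bs pa pc res
      = bs.foldl (fun res i => res + (tw a' i : Int) * (tw c' i : Int)) res := by
  induction bs generalizing pa pc res with
  | nil => rfl
  | cons v bs ih =>
      have hv : v ∈ v :: bs := List.mem_cons_self ..
      have hpa' : adv a' v pa = tw a' v := adv_eq a' v pa (hpa v hv)
      have hpc' : adv c' v pc = tw c' v := adv_eq c' v pc (hpc v hv)
      have hrest : ∀ w ∈ bs, v ≤ w := fun w hw => (List.pairwise_cons.mp hbs).1 w hw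
      simp only [tripLoop, hpa', hpc', List.foldl_cons]
      exact ih (tw a' v) (tw c' v) _ (List.pairwise_cons.mp hbs).2
        (fun w hw => tw_mono a' v w (hrest w hw))
        (fun w hw => tw_mono c' v w (hrest w hw))

theorem dss_sorted (xs : List Int) : (dss xs).Pairwise (· ≤ ·) :=
  (PySem.List.sorted_ofList_pairwise_lt xs).imp le_of_lt

-- ===== VERDICT (by name: the statement is the Claim_ definition above) =====
theorem triplets_spec : Claim_equal_triplets := by
  intro a b c _
  unfold Spec_triplets triplets triplets_alt
  rw [loop_eq (dss a) (dss c) (dss b) 0 0 0 (dss_sorted b)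
        (fun v _ => Nat.zero_le _) (fun v _ => Nat.zero_le _)]
  simp only [br_eq_tw _ _ (dss_sorted a), br_eq_tw _ _ (dss_sorted c)]
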